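-- pv_equiv track=rewrite | github.com/hardlanebakura/OnlineParser | subsidiary_functions.py | delete_keys
-- ===== SOURCE A (Python) =====
-- def delete_keys(dict1, indexes_to_remove):
--     if not (isinstance(dict1, dict)):
--         raise TypeError("Expected dict input")
--     if not isinstance(indexes_to_remove, list):
--         raise TypeError("Expected list input")
--     list1 = list(dict1.items())
--     list2 = []
--     for i in range(len(list1)):
--         if i not in indexes_to_remove:
--             list2.append(list1[i])
--     dict1 = dict(list2)
--     return dict1
-- ===== SOURCE B (Python) =====
-- def delete_keys(dict1, indexes_to_remove):
--     if not (isinstance(dict1, dict)):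
--         raise TypeError("Expected dict input")
--     if not isinstance(indexes_to_remove, list):
--         raise TypeError("Expected list input")
--     items = list(dict1.items())
--     for i in sorted({i for i in indexes_to_remove if 0 <= i < len(items)}, reverse=True):
--         del items[i]
--     return dict(items)
-- ===== Notes on version B (the rewrite author's own statement) =====
-- stated objective: faster
-- what changed: Instead of A's single filtering pass that scans the whole index list for every position, B dedups and sorts the valid indexes in descending order and deletes the doomed items in place one position at a time (del items[i]), a staged mutate-by-position algorithm rather than a filter.
import Mathlib
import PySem

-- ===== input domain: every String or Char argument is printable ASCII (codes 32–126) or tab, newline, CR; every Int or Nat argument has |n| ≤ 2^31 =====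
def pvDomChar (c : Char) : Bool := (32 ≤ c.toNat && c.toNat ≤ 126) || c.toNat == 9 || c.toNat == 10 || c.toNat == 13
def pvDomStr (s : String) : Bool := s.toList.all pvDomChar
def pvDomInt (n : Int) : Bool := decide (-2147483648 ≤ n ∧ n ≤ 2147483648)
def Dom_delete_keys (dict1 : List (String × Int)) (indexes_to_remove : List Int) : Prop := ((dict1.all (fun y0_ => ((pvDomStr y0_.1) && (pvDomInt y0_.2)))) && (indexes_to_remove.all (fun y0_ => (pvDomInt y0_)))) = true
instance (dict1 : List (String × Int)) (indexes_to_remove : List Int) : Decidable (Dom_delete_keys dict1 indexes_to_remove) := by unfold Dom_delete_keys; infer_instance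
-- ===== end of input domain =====

-- B replaces A's filtering pass (which scans the index list once per position) by staged
-- in-place deletion: dedup the valid indexes, sort them in descending order, and delete the
-- item at each position with 'del items[i]' (descending order keeps lower positions stable).
-- The two isinstance type guards of the Python are static under the type convention (dict1 is
-- a dict, indexes_to_remove is a list), so they do not appear in the ports.

-- ===== PORT A =====
def delete_keys (dict1 : List (String × Int)) (indexes_to_remove : List Int) : List (String × Int) :=
  let list1 := dict1
  let list2 : List (String × Int) :=
    (PySem.List.pyRange 0 (PySem.List.len list1) 1).foldl
      (fun acc i =>
        if i ∉ indexes_to_remove then acc ++ [PySem.List.pyGetD list1 i ("", 0)] else acc) []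
  (PySem.Dict.ofList list2).items

-- ===== PORT B =====
def delete_keys_alt (dict1 : List (String × Int)) (indexes_to_remove : List Int) : List (String × Int) :=
  let items := dict1
  -- sorted({i for i in indexes_to_remove if 0 <= i < len(items)}, reverse=True)
  let ds : List Int :=
    PySem.List.sorted
      (PySem.Set.ofList (indexes_to_remove.filter
        (fun i => decide (0 ≤ i) && decide (i < (items.length : Int)))))
      (fun x => x) true
  -- for i in ds: del items[i]   (each i is a valid index at deletion time, so del = eraseIdx)
  let items2 := ds.foldl (fun acc i => acc.eraseIdx i.toNat) items
  (PySem.Dict.ofList items2).items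

-- ===== PRECONDITION & SPEC =====
-- Pre_ says the association list represents a Python dict: keys are pairwise distinct (a real
-- dict argument can never carry duplicate keys, so this excludes no input the Python accepts).
def Pre_delete_keys (dict1 : List (String × Int)) (indexes_to_remove : List Int) : Prop :=
  (dict1.map Prod.fst).Nodup
instance (dict1 : List (String × Int)) (indexes_to_remove : List Int) : Decidable (Pre_delete_keys dict1 indexes_to_remove) := by unfold Pre_delete_keys; infer_instance

def pvWitness_delete_keys : (List (String × Int)) × List Int := ([("a", 1), ("b", 2), ("c", 3)], [1, -1, 5])

def Spec_delete_keys (dict1 : List (String × Int)) (indexes_to_remove : List Int) (out : List (String × Int)) : Prop := out = delete_keys_alt dict1 indexes_to_remove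
instance (dict1 : List (String × Int)) (indexes_to_remove : List Int) (out : List (String × Int)) : Decidable (Spec_delete_keys dict1 indexes_to_remove out) := by unfold Spec_delete_keys; infer_instance

-- ===== CLAIM (what is proved, stated in full; the proofs are below) =====
def Claim_equal_delete_keys : Prop := ∀ (dict1 : List (String × Int)) (indexes_to_remove : List Int), Dom_delete_keys dict1 indexes_to_remove → Pre_delete_keys dict1 indexes_to_remove → Spec_delete_keys dict1 indexes_to_remove (delete_keys dict1 indexes_to_remove)

-- ===== LEMMAS AND PROOFS =====

-- Selecting positions of l by a predicate on the index equals filtering l by a predicate on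
-- the element, whenever the two predicates agree pointwise along l.
theorem pv_filter_by_index {α : Type} (l : List α) (d : α) (p : Nat → Bool) (q : α → Bool)
    (h : ∀ (k : Nat) (hk : k < l.length), p k = q l[k]) :
    ((List.range l.length).filter p).map (fun k => l.getD k d) = l.filter q := by
  induction l using List.reverseRecOn with
  | nil => simp
  | append_singleton l x ih =>
    have hlen : (l ++ [x]).length = l.length + 1 := by simp
    rw [hlen, List.range_succ, List.filter_append, List.map_append]
    have h1 : ∀ (k : Nat) (hk : k < l.length), p k = q l[k] := by
      intro k hk
      have := h k (by simp; omega)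
      rwa [List.getElem_append_left hk] at this
    have h2 : ((List.range l.length).filter p).map (fun k => (l ++ [x]).getD k d)
        = ((List.range l.length).filter p).map (fun k => l.getD k d) := by
      apply List.map_congr_left
      intro k hk
      have hk' : k < l.length := by
        have := List.mem_filter.mp hk
        simpa using List.mem_range.mp this.1
      simp [List.getD_eq_getElem?_getD, List.getElem?_append_left hk']
    rw [h2, ih h1, List.filter_append]
    congr 1
    have hx : p l.length = q x := by
      have := h l.length (by simp)
      simpa using this
    by_cases hq : q x = true
    · simp [hx, hq, List.getD_eq_getElem?_getD]
    · simp at hq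
      simp [hx, hq]

-- (Dict.ofList l).items = l for an association list with distinct keys.
theorem pv_items_ofList (l : List (String × Int)) (h : (l.map Prod.fst).Nodup) :
    (PySem.Dict.ofList l).items = l := by
  have := PySem.Dict.items_foldl_insert_fresh l Prod.fst Prod.snd (PySem.Dict.empty)
    (by intro a _; simp [pysem]) h
  simpa [PySem.Dict.ofList, PySem.Dict.update] using this

-- Deleting a strictly decreasing list of valid positions equals keeping every position not
-- in the list.
theorem pv_erase_fold (l : List (String × Int)) (ds : List Int)
    (hdec : ds.Pairwise (fun a b => b < a))
    (hmem : ∀ i ∈ ds, 0 ≤ i ∧ i < (l.length : Int)) :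
    ds.foldl (fun acc i => acc.eraseIdx i.toNat) l
      = ((List.range l.length).filter (fun k : Nat => decide ((k : Int) ∉ ds))).map
          (fun k => l.getD k ("", 0)) := by
  induction ds generalizing l with
  | nil =>
    simp only [List.foldl_nil]
    have := pv_filter_by_index l ("", 0) (fun _ => true) (fun _ => true) (by intro k hk; rfl)
    simpa using this.symm
  | cons d rest ih =>
    obtain ⟨hd0, hdn⟩ := hmem d (List.mem_cons_self)
    have hpc := List.pairwise_cons.mp hdec
    have hrest_lt : ∀ i ∈ rest, i < d := hpc.1
    have he : d.toNat < l.length := by omega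
    have hlen' : (l.eraseIdx d.toNat).length = l.length - 1 := List.length_eraseIdx_of_lt he
    have hIH := ih (l.eraseIdx d.toNat) hpc.2 (by
      intro i hi
      have h1 := hrest_lt i hi
      have h2 := (hmem i (List.mem_cons_of_mem d hi)).1
      rw [hlen']
      omega)
    rw [List.foldl_cons, hIH, hlen']
    set n := l.length with hn
    set e := d.toNat with he_def
    have hde : (e : Int) = d := by omega
    obtain ⟨m, hm⟩ : ∃ m, n = e + 1 + m := ⟨n - 1 - e, by omega⟩
    have hsplit1 : List.range n = List.range e ++ [e] ++ (List.range m).map (fun j => e + (1 + j)) := by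
      rw [show n = e + (1 + m) from by omega, List.range_add, List.range_add]
      simp [List.map_map, List.append_assoc]
      omega
    have hsplit2 : List.range (n-1) = List.range e ++ (List.range m).map (fun j => e + j) := by
      rw [show n - 1 = e + m from by omega, List.range_add]
    rw [hsplit1, hsplit2]
    simp only [List.filter_append, List.map_append]
    -- head parts agree
    have hhead : ((List.range e).filter (fun k : Nat => decide ((k : Int) ∉ rest))).map
          (fun k => (l.eraseIdx e).getD k ("", 0))
        = ((List.range e).filter (fun k : Nat => decide ((k : Int) ∉ d :: rest))).map
          (fun k => l.getD k ("", 0)) := by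
      have hfc : ∀ k ∈ List.range e,
          (decide ((k : Int) ∉ rest)) = (decide ((k : Int) ∉ d :: rest)) := by
        intro k hk
        have hk' : k < e := List.mem_range.mp hk
        rw [decide_eq_decide]
        simp only [List.mem_cons]
        constructor
        · intro h hc
          rcases hc with hc | hc
          · omega
          · exact h hc
        · intro h hc; exact h (Or.inr hc)
      rw [List.filter_congr hfc]
      apply List.map_congr_left
      intro k hk
      have hk' : k < e := List.mem_range.mp (List.mem_filter.mp hk).1
      have hkb : k < (l.eraseIdx e).length := by rw [hlen']; omega
      rw [List.getD_eq_getElem _ _ hkb, List.getD_eq_getElem _ _ (by omega : k < l.length)]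
      exact List.getElem_eraseIdx_of_lt hkb hk'
    -- the middle element e is dropped on the right
    have hmid : ([e].filter (fun k : Nat => decide ((k : Int) ∉ d :: rest))) = [] := by
      simp [hde]
    -- tail parts agree
    have htail : (((List.range m).map (fun j => e + j)).filter
          (fun k : Nat => decide ((k : Int) ∉ rest))).map (fun k => (l.eraseIdx e).getD k ("", 0))
        = (((List.range m).map (fun j => e + (1 + j))).filter
          (fun k : Nat => decide ((k : Int) ∉ d :: rest))).map (fun k => l.getD k ("", 0)) := by
      rw [List.filter_eq_self.mpr (by
        intro k hk
        obtain ⟨j, hj, rfl⟩ := List.mem_map.mp hk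
        simp only [decide_eq_true_eq]
        intro hc
        have := hrest_lt _ hc
        omega), List.filter_eq_self.mpr (by
        intro k hk
        obtain ⟨j, hj, rfl⟩ := List.mem_map.mp hk
        simp only [decide_eq_true_eq, List.mem_cons]
        rintro (hc | hc)
        · omega
        · have := hrest_lt _ hc
          omega)]
      rw [List.map_map, List.map_map]
      apply List.map_congr_left
      intro j hj
      have hj' : j < m := List.mem_range.mp hj
      simp only [Function.comp]
      have hb1 : e + j < (l.eraseIdx e).length := by rw [hlen']; omega
      have hb2 : e + (1 + j) < l.length := by omega
      rw [List.getD_eq_getElem _ _ hb1, List.getD_eq_getElem _ _ hb2]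
      rw [List.getElem_eraseIdx_of_ge hb1 (by omega)]
      congr 1
      omega
    rw [hhead, hmid, htail]
    simp

-- The kept pairs have distinct keys: a position-selection of a nodup-keyed list.
theorem pv_nodup_kept (dict1 : List (String × Int)) (p : Nat → Bool)
    (hnd : (dict1.map Prod.fst).Nodup) :
    ((((List.range dict1.length).filter p).map (fun k => dict1.getD k ("", 0))).map
      Prod.fst).Nodup := by
  have hsub : ∀ k ∈ (List.range dict1.length).filter p, k < dict1.length := by
    intro k hk
    simpa using List.mem_range.mp (List.mem_filter.mp hk).1
  rw [List.map_map]
  apply List.Nodup.map_on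
  · intro x hx y hy hxy
    have hxl := hsub x hx
    have hyl := hsub y hy
    simp only [Function.comp, List.getD_eq_getElem _ _ hxl, List.getD_eq_getElem _ _ hyl] at hxy
    have : (dict1.map Prod.fst)[x]'(by simpa using hxl)
         = (dict1.map Prod.fst)[y]'(by simpa using hyl) := by simpa using hxy
    exact (List.Nodup.getElem_inj_iff hnd).mp this
  · exact List.Nodup.filter _ (List.nodup_range)

-- A's loop produces exactly the positions whose index is not listed.
theorem pv_A_form (dict1 : List (String × Int)) (idx : List Int)
    (hnd : (dict1.map Prod.fst).Nodup) :
    delete_keys dict1 idx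
      = ((List.range dict1.length).filter (fun k : Nat => decide ((k : Int) ∉ idx))).map
          (fun k => dict1.getD k ("", 0)) := by
  unfold delete_keys
  simp only [PySem.List.len_eq]
  rw [PySem.List.foldl_append_ite, PySem.List.pyRange_one]
  simp only [Int.sub_zero, Int.toNat_natCast, zero_add, List.filter_map, List.map_map,
    List.nil_append]
  have hcomp : ((List.range dict1.length).filter
        ((fun i => decide (i ∉ idx)) ∘ (fun k : Nat => (k : Int)))).map
      ((fun i => PySem.List.pyGetD dict1 i ("", 0)) ∘ (fun k : Nat => (k : Int)))
      = ((List.range dict1.length).filter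
        (fun k : Nat => decide ((k : Int) ∉ idx))).map (fun k => dict1.getD k ("", 0)) := by
    apply List.map_congr_left
    intro k hk
    simp
  rw [hcomp]
  exact pv_items_ofList _ (pv_nodup_kept dict1 _ hnd)

-- ===== VERDICT (by name: the statement is the Claim_ definition above) =====
theorem delete_keys_spec : Claim_equal_delete_keys := by
  intro dict1 idx _ hnd
  unfold Spec_delete_keys
  rw [pv_A_form dict1 idx hnd]
  have hB : delete_keys_alt dict1 idx
      = (PySem.Dict.ofList
          ((PySem.List.sorted
              (PySem.Set.ofList (idx.filter
                (fun i => decide (0 ≤ i) && decide (i < (dict1.length : Int)))))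
              (fun x : Int => x) true).foldl
            (fun acc i => acc.eraseIdx i.toNat) dict1)).items := rfl
  rw [hB]
  set ds : List Int :=
    PySem.List.sorted
      (PySem.Set.ofList (idx.filter
        (fun i => decide (0 ≤ i) && decide (i < (dict1.length : Int)))))
      (fun x : Int => x) true with hds
  have hmem_ds : ∀ i, i ∈ ds ↔ (i ∈ idx ∧ 0 ≤ i ∧ i < (dict1.length : Int)) := by
    intro i
    rw [hds, PySem.List.mem_sorted, PySem.Set.mem_ofList, List.mem_filter]
    simp
  have hdec : ds.Pairwise (fun a b => b < a) := by
    have hle : ds.Pairwise (fun a b : Int => b ≤ a) :=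
      PySem.List.sorted_pairwise_rev _ _
    have hnodup : ds.Nodup :=
      ((PySem.List.sorted_perm _ _ _).nodup_iff).mpr (PySem.Set.nodup_ofList _)
    exact (hle.and hnodup).imp (by rintro a b ⟨h1, h2⟩; omega)
  rw [pv_erase_fold dict1 ds hdec (fun i hi => ((hmem_ds i).mp hi).2)]
  have hfc : ∀ k ∈ List.range dict1.length,
      (decide ((k : Int) ∉ idx)) = (decide ((k : Int) ∉ ds)) := by
    intro k hk
    have hk' : k < dict1.length := List.mem_range.mp hk
    rw [decide_eq_decide, not_iff_not, hmem_ds]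
    constructor
    · intro h; exact ⟨h, by omega, by omega⟩
    · intro h; exact h.1
  rw [List.filter_congr hfc]
  exact (pv_items_ofList _ (pv_nodup_kept dict1 _ hnd)).symm
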